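-- pv_equiv track=rewrite | github.com/Prowderypulp/DIRA | features.py | _tandem_repeat_score
-- ===== SOURCE A (Python) =====
-- def _tandem_repeat_score(ref_seq: str, window: int = 20) -> int:
--     """
--     Crude tandem repeat score: length of the longest exact k-mer (k=2..6)
--     that repeats consecutively within a window of the reference.
--     """
--     seq = ref_seq[:window].upper()
--     best = 1
--     for k in range(2, 7):
--         for start in range(len(seq) - k):
--             unit = seq[start:start + k]
--             count = 1
--             pos = start + k
--             while pos + k <= len(seq) and seq[pos:pos + k] == unit:
--                 count += 1
--                 pos += k
--             if count > 1:
--                 best = max(best, k * count)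
--     return best
-- ===== SOURCE B (Python) =====
-- def _tandem_repeat_score(ref_seq: str, window: int = 20) -> int:
--     seq = ref_seq[:window].upper()
--     n = len(seq)
--     best = 1
--     for k in range(2, 7):
--         # run lengths of consecutive positions i with seq[i] == seq[i+k],
--         # computed right-to-left in one pass, then read per start
--         rrev = []
--         run = 0
--         for i in range(n - 1, -1, -1):
--             run = run + 1 if i + k < n and seq[i] == seq[i + k] else 0
--             rrev.append(run)
--         r = rrev[::-1]
--         for s in range(n - k):
--             if r[s] >= k:
--                 best = max(best, k * (1 + r[s] // k))
--     return best
-- ===== Notes on version B (the rewrite author's own statement) =====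
-- stated objective: faster
-- what changed: Replaces A's per-start anchored-unit re-extension (an inner while loop re-comparing k-long slices from every start) by one right-to-left run-length pass per period k over positions with seq[i]==seq[i+k], reading each start's copy count off the precomputed run table via the closed form count = 1 + r[s]//k.
import Mathlib
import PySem

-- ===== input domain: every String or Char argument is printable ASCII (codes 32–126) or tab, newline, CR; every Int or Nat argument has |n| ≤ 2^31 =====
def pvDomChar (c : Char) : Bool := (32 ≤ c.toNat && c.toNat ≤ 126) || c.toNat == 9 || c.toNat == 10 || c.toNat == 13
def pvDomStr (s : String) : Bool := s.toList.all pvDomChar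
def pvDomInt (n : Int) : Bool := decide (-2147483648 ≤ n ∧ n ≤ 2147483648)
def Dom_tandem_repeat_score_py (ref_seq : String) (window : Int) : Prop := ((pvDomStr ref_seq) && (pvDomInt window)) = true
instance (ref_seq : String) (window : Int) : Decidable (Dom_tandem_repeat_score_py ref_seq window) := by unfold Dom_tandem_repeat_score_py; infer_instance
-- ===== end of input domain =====

-- B replaces A's anchor-a-unit-and-re-extend inner while loop by a single right-to-left
-- run-length pass per period k plus the closed form count = 1 + r[s]//k (objective: faster).

-- ===== PORT A =====
-- the 'while pos + k <= len(seq) and seq[pos:pos+k] == unit' loop; fuel = len(seq)+1 is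
-- only a totality guard (every iteration requires pos + k ≤ len and advances pos by k ≥ 2)
def pvAWhile (seq : List Char) (k : Int) (unit : List Char) : Nat → Int → Int → Int
  | 0, _, count => count
  | fuel+1, pos, count =>
    if pos + k ≤ (seq.length : Int) ∧ PySem.List.slice seq (some pos) (some (pos + k)) = unit
    then pvAWhile seq k unit fuel (pos + k) (count + 1)
    else count

def tandem_repeat_score_py (ref_seq : String) (window : Int) : Int :=
  let seq := PySem.Chars.upper (PySem.List.slice ref_seq.toList none (some window))
  (PySem.List.pyRange 2 7 1).foldl (fun best k =>
    (PySem.List.pyRange 0 ((seq.length : Int) - k) 1).foldl (fun best start =>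
      let unit := PySem.List.slice seq (some start) (some (start + k))
      let count := pvAWhile seq k unit (seq.length + 1) (start + k) 1
      if count > 1 then max best (k * count) else best) best) 1

-- ===== PORT B =====
def tandem_repeat_score_py_alt (ref_seq : String) (window : Int) : Int :=
  let seq := PySem.Chars.upper (PySem.List.slice ref_seq.toList none (some window))
  let n := seq.length
  (PySem.List.pyRange 2 7 1).foldl (fun best k =>
    -- one right-to-left pass: run lengths of consecutive i with seq[i] == seq[i+k]
    let p := (PySem.List.pyRange ((n : Int) - 1) (-1) (-1)).foldl
      (fun (st : List Int × Int) i =>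
        let run := if i + k < (n : Int) ∧ PySem.List.pyGet? seq i == PySem.List.pyGet? seq (i + k)
                   then st.2 + 1 else 0
        (st.1 ++ [run], run)) ([], 0)
    let r := (PySem.List.slice? p.1 none none (-1)).getD []   -- rrev[::-1]
    (PySem.List.pyRange 0 ((n : Int) - k) 1).foldl (fun best s =>
      if PySem.List.pyGetD r s 0 ≥ k
      then max best (k * (1 + PySem.Int.floordiv (PySem.List.pyGetD r s 0) k))
      else best) best) 1

-- ===== PRECONDITION & SPEC =====
def Spec_tandem_repeat_score_py (ref_seq : String) (window : Int) (out : Int) : Prop := out = tandem_repeat_score_py_alt ref_seq window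
instance (ref_seq : String) (window : Int) (out : Int) : Decidable (Spec_tandem_repeat_score_py ref_seq window out) := by unfold Spec_tandem_repeat_score_py; infer_instance

-- ===== CLAIM (what is proved, stated in full; the proofs are below) =====
def Claim_equal_tandem_repeat_score_py : Prop := ∀ (ref_seq : String) (window : Int), Dom_tandem_repeat_score_py ref_seq window → Spec_tandem_repeat_score_py ref_seq window (tandem_repeat_score_py ref_seq window)

-- ===== LEMMAS AND PROOFS =====

-- a "match" at position j: the characters k apart agree (what B's pass tests at j)
abbrev pvM (seq : List Char) (k j : Nat) : Prop := j + k < seq.length ∧ seq[j]? = seq[j+k]?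

-- run length of consecutive matches starting at i (the value B's right-to-left pass records)
def pvRun (seq : List Char) (k i : Nat) : Nat :=
  if h : i + k < seq.length ∧ seq[i]? = seq[i + k]? then pvRun seq k (i + 1) + 1 else 0
termination_by seq.length - i
decreasing_by omega

lemma pvRun_of_le (seq : List Char) (k i : Nat) (h : seq.length ≤ i + k) : pvRun seq k i = 0 := by
  rw [pvRun, dif_neg]; rintro ⟨h1, -⟩; omega

lemma pvRun_ge_iff (seq : List Char) (k : Nat) :
    ∀ (m i : Nat), m ≤ pvRun seq k i ↔ ∀ t < m, pvM seq k (i + t) := by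
  intro m
  induction m with
  | zero => intro i; simp
  | succ m ih =>
    intro i
    rw [pvRun]
    by_cases h : i + k < seq.length ∧ seq[i]? = seq[i + k]?
    · rw [dif_pos h, Nat.add_le_add_iff_right, ih (i + 1)]
      constructor
      · intro hall t ht
        match t with
        | 0 => simpa [pvM] using h
        | (t' + 1) =>
          have h2 := hall t' (by omega)
          have e : i + 1 + t' = i + (t' + 1) := by omega
          rwa [e] at h2
      · intro hall t ht
        have h2 := hall (t + 1) (by omega)
        have e : i + (t + 1) = i + 1 + t := by omega
        rwa [e] at h2
    · rw [dif_neg h]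
      constructor
      · omega
      · intro hall
        exact absurd (by simpa [pvM] using hall 0 (by omega)) h

lemma pvRun_block (seq : List Char) (k : Nat) :
    ∀ (c i : Nat), (∀ t < c, pvM seq k (i + t)) → pvRun seq k i = c + pvRun seq k (i + c) := by
  intro c
  induction c with
  | zero => intro i _; simp
  | succ c ih =>
    intro i hall
    have h0 : pvM seq k i := by simpa using hall 0 (by omega)
    rw [pvRun, dif_pos (by simpa [pvM] using h0)]
    have h1 : pvRun seq k (i + 1) = c + pvRun seq k (i + 1 + c) := by
      refine ih (i + 1) (fun t ht => ?_)
      have h2 := hall (t + 1) (by omega)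
      have e : i + (t + 1) = i + 1 + t := by omega
      rwa [e] at h2
    rw [h1, show i + 1 + c = i + (c + 1) by omega]
    omega

-- the anchored block comparison of A is exactly a k-long stretch of matches
lemma pvBlock_iff (seq : List Char) (k s : Nat) (hk : 1 ≤ k) :
    (s + k + k ≤ seq.length ∧ (seq.drop (s + k)).take k = (seq.drop s).take k)
      ↔ ∀ t < k, pvM seq k (s + t) := by
  constructor
  · rintro ⟨hlen, heq⟩ t ht
    refine ⟨by omega, ?_⟩
    have h2 := congrArg (fun l => l[t]?) heq
    simp only [List.getElem?_take, List.getElem?_drop, if_pos ht] at h2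
    rw [show s + t + k = s + k + t by omega]
    exact h2.symm
  · intro hall
    have hlen : s + k + k ≤ seq.length := by
      have := (hall (k - 1) (by omega)).1
      omega
    refine ⟨hlen, ?_⟩
    apply List.ext_getElem?
    intro t
    simp only [List.getElem?_take, List.getElem?_drop]
    split_ifs with ht
    · have h2 := (hall t ht).2
      rw [show s + k + t = s + t + k by omega]
      exact h2.symm
    · rfl

lemma pvAWhile_shift (seq : List Char) (k : Int) (u : List Char) :
    ∀ (fuel : Nat) (pos c : Int), pvAWhile seq k u fuel pos (c + 1) = c + pvAWhile seq k u fuel pos 1 := by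
  intro fuel
  induction fuel with
  | zero => intro pos c; simp [pvAWhile]
  | succ fuel ih =>
    intro pos c
    simp only [pvAWhile]
    split_ifs with h
    · rw [show c + 1 + 1 = (c + 1) + 1 from rfl, ih (pos + k) (c + 1), ih (pos + k) 1]
      ring
    · ring

-- A's extension loop from start s computes 1 + (run length at s) / k
lemma pvAWhile_key (seq : List Char) (k : Nat) (hk : 2 ≤ k) :
    ∀ (fuel s : Nat), s + k ≤ seq.length → seq.length - s ≤ fuel →
    pvAWhile seq (k : Int) ((seq.drop s).take k) fuel ((s : Int) + (k : Int)) 1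
      = 1 + ((pvRun seq k s / k : Nat) : Int) := by
  intro fuel
  induction fuel with
  | zero => intro s h1 h2; omega
  | succ fuel ih =>
    intro s h1 h2
    have hslice : PySem.List.slice seq (some ((s : Int) + (k : Int))) (some ((s : Int) + (k : Int) + (k : Int)))
        = (seq.drop (s + k)).take k := by
      rw [show ((s : Int) + (k : Int)) = (((s + k : Nat)) : Int) by push_cast; ring]
      exact PySem.List.slice_natCast_add seq (s + k) k
    simp only [pvAWhile]
    by_cases hall : ∀ t < k, pvM seq k (s + t)
    · have hblock := (pvBlock_iff seq k s (by omega)).mpr hall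
      rw [if_pos ⟨by omega, by rw [hslice, hblock.2]⟩]
      rw [← hblock.2, pvAWhile_shift seq (k : Int) _ fuel ((s : Int) + (k : Int) + (k : Int)) 1]
      rw [show (s : Int) + (k : Int) + (k : Int) = (((s + k : Nat)) : Int) + (k : Int) by push_cast; ring]
      rw [ih (s + k) (by omega) (by omega)]
      rw [pvRun_block seq k k s hall, Nat.add_comm k (pvRun seq k (s + k)),
          Nat.add_div_right _ (by omega : 0 < k)]
      push_cast; ring
    · rw [if_neg]
      · have hlt : pvRun seq k s < k := by
          by_contra hge
          exact hall ((pvRun_ge_iff seq k k s).mp (by omega))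
        rw [Nat.div_eq_of_lt hlt]
        simp
      · rintro ⟨hle, hsl⟩
        apply hall
        apply (pvBlock_iff seq k s (by omega)).mp
        exact ⟨by omega, hslice.symm.trans hsl⟩

-- B's right-to-left pass builds exactly the reversed table of pvRun values
lemma pvBfold (seq : List Char) (k : Nat) :
    ∀ (j : Nat), j ≤ seq.length → ∀ (acc : List Int),
    List.foldl (fun (st : List Int × Int) (i : Int) =>
        (st.1 ++ [if i + (k : Int) < ((seq.length : Nat) : Int) ∧
                     PySem.List.pyGet? seq i == PySem.List.pyGet? seq (i + (k : Int))
                  then st.2 + 1 else 0],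
         if i + (k : Int) < ((seq.length : Nat) : Int) ∧
              PySem.List.pyGet? seq i == PySem.List.pyGet? seq (i + (k : Int))
         then st.2 + 1 else 0))
      (acc, ((pvRun seq k j : Nat) : Int)) (PySem.List.pyRange ((j : Int) - 1) (-1) (-1))
    = (acc ++ (List.range j).reverse.map (fun t => ((pvRun seq k t : Nat) : Int)),
       ((pvRun seq k 0 : Nat) : Int)) := by
  intro j
  induction j with
  | zero =>
    intro _ acc
    rw [show ((0 : Nat) : Int) - 1 = -1 by norm_num, PySem.List.pyRange_neg_one_eq_nil (by norm_num)]
    simp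
  | succ j ih =>
    intro hj acc
    rw [show (((j + 1 : Nat)) : Int) - 1 = ((j : Nat) : Int) by push_cast; ring,
        PySem.List.pyRange_neg_one_cons (by omega : (-1 : Int) < ((j : Nat) : Int)), List.foldl_cons]
    have hstep : (if ((j : Nat) : Int) + (k : Int) < ((seq.length : Nat) : Int) ∧
                     PySem.List.pyGet? seq ((j : Nat) : Int) == PySem.List.pyGet? seq (((j : Nat) : Int) + (k : Int))
                  then ((pvRun seq k (j + 1) : Nat) : Int) + 1 else 0) = ((pvRun seq k j : Nat) : Int) := by
      rw [show (((j : Nat) : Int) + (k : Int)) = (((j + k : Nat)) : Int) by push_cast; ring,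
          PySem.List.pyGet?_natCast, PySem.List.pyGet?_natCast]
      by_cases h : j + k < seq.length ∧ seq[j]? = seq[j + k]?
      · rw [if_pos ⟨by exact_mod_cast h.1, by simp [h.2]⟩]
        conv_rhs => rw [pvRun]
        rw [dif_pos h]
        push_cast; ring
      · rw [if_neg (fun hc => h ⟨by exact_mod_cast hc.1, by simpa using hc.2⟩)]
        conv_rhs => rw [pvRun]
        rw [dif_neg h]
        simp
    dsimp only
    rw [hstep, ih (by omega) (acc ++ [((pvRun seq k j : Nat) : Int)])]
    rw [List.range_succ, List.reverse_append]
    simp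

lemma pvBfold_top (seq : List Char) (k : Nat) :
    List.foldl (fun (st : List Int × Int) (i : Int) =>
        (st.1 ++ [if i + (k : Int) < ((seq.length : Nat) : Int) ∧
                     PySem.List.pyGet? seq i == PySem.List.pyGet? seq (i + (k : Int))
                  then st.2 + 1 else 0],
         if i + (k : Int) < ((seq.length : Nat) : Int) ∧
              PySem.List.pyGet? seq i == PySem.List.pyGet? seq (i + (k : Int))
         then st.2 + 1 else 0))
      (([] : List Int), (0 : Int)) (PySem.List.pyRange ((seq.length : Int) - 1) (-1) (-1))
    = ((List.range seq.length).reverse.map (fun t => ((pvRun seq k t : Nat) : Int)),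
       ((pvRun seq k 0 : Nat) : Int)) := by
  have h := pvBfold seq k seq.length (le_refl _) []
  rw [pvRun_of_le seq k seq.length (by omega)] at h
  simpa using h

theorem tandem_repeat_score_py_spec : Claim_equal_tandem_repeat_score_py := by
  intro ref_seq window _
  unfold Spec_tandem_repeat_score_py
  unfold tandem_repeat_score_py tandem_repeat_score_py_alt
  simp only []
  generalize PySem.Chars.upper (PySem.List.slice ref_seq.toList none (some window)) = seq
  apply PySem.List.foldl_congr_mem
  intro best kI hkI
  obtain ⟨hk2, hk7⟩ := PySem.List.mem_pyRange_one.mp hkI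
  obtain ⟨kN, rfl⟩ : ∃ kN : Nat, kI = (kN : Int) := ⟨kI.toNat, (Int.toNat_of_nonneg (by omega)).symm⟩
  have hk2N : 2 ≤ kN := by exact_mod_cast hk2
  simp only [pvBfold_top seq kN, PySem.List.slice?_none_none_neg_one, Option.getD_some,
             List.map_reverse, List.reverse_reverse]
  apply PySem.List.foldl_congr_mem
  intro acc s hs
  obtain ⟨hs0, hslt⟩ := PySem.List.mem_pyRange_one.mp hs
  obtain ⟨sN, rfl⟩ : ∃ sN : Nat, s = (sN : Int) := ⟨s.toNat, (Int.toNat_of_nonneg hs0).symm⟩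
  have hsk : sN + kN ≤ seq.length := by omega
  rw [PySem.List.slice_natCast_add seq sN kN,
      pvAWhile_key seq kN hk2N (seq.length + 1) sN hsk (by omega),
      PySem.List.pyGetD_natCast,
      PySem.List.getD_map_range _ _ _ _ (by omega : sN < seq.length),
      PySem.Int.floordiv_natCast (pvRun seq kN sN) kN]
  by_cases hge : kN ≤ pvRun seq kN sN
  · have h1 : (1 : Int) < 1 + ((pvRun seq kN sN / kN : Nat) : Int) := by
      have h3 := (Nat.one_le_div_iff (show 0 < kN by omega)).mpr hge
      push_cast
      omega
    have h2 : ((kN : Nat) : Int) ≤ ((pvRun seq kN sN : Nat) : Int) := by exact_mod_cast hge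
    rw [if_pos h1, if_pos h2]
  · have hdiv : pvRun seq kN sN / kN = 0 := Nat.div_eq_of_lt (by omega)
    have h1 : ¬ ((1 : Int) < 1 + ((pvRun seq kN sN / kN : Nat) : Int)) := by
      rw [hdiv]
      norm_num
    have h2 : ¬ (((kN : Nat) : Int) ≤ ((pvRun seq kN sN : Nat) : Int)) := by
      exact_mod_cast hge
    rw [if_neg h1, if_neg h2]
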